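-- pv_equiv track=rewrite | github.com/c788630/Numclass | src/numclass/classifiers/diophantine.py | _icbrt_exact
-- ===== SOURCE A (Python) =====
-- def _icbrt_exact(m: int) -> int | None:
--     if m == 0:
--         return 0
--     sgn = -1 if m < 0 else 1
--     a = abs(m)
--     # initial guess, then correct
--     k = round(a ** (1.0/3.0))
--     # nudge until exact
--     while k * k * k < a:
--         k += 1
--     while k * k * k > a:
--         k -= 1
--     return sgn * k if k * k * k == a else None
-- ===== SOURCE B (Python) =====
-- def _icbrt_exact(m: int) -> int | None:
--     if m == 0:
--         return 0
--     sgn = -1 if m < 0 else 1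
--     a = abs(m)
--     # binary search for the largest nonnegative k whose cube is at most a; no floats
--     lo, hi, k = 0, a, 0
--     while lo <= hi:
--         mid = (lo + hi) // 2
--         if mid * mid * mid <= a:
--             k = mid
--             lo = mid + 1
--         else:
--             hi = mid - 1
--     return sgn * k if k * k * k == a else None
-- ===== Notes on version B (the rewrite author's own statement) =====
-- stated objective: alternative
-- what changed: Replaced the float cube-root estimate plus linear nudge loops with a pure-integer binary search for the largest k whose cube is at most abs(m); no float arithmetic anywhere.
import Mathlib
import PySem

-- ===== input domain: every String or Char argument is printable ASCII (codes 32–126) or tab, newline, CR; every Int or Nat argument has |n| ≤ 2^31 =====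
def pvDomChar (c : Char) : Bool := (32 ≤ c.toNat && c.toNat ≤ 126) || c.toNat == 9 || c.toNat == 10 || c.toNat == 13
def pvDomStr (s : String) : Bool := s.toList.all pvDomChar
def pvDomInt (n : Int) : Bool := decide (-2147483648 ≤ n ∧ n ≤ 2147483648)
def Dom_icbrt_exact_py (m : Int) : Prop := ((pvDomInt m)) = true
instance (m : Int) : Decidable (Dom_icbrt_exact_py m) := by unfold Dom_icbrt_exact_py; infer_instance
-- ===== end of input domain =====

-- B replaces A's float-estimate-plus-nudge with a pure-integer binary search for the cube root (alternative algorithm, no floats).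


-- ===== PORT A =====
-- A's 'while k*k*k < a: k += 1' loop
def pvNudgeUp (a k : Int) : Int :=
  if k * k * k < a then pvNudgeUp a (k + 1) else k
termination_by (a - k * k * k).toNat
decreasing_by
  have h : k * k * k < (k + 1) * (k + 1) * (k + 1) := by nlinarith [sq_nonneg (2 * k + 1)]
  omega

-- A's 'while k*k*k > a: k -= 1' loop
def pvNudgeDown (a k : Int) : Int :=
  if k * k * k > a then pvNudgeDown a (k - 1) else k
termination_by (k * k * k - a).toNat
decreasing_by
  have h : (k - 1) * (k - 1) * (k - 1) < k * k * k := by nlinarith [sq_nonneg (2 * k - 1)]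
  omega

-- Literal port of A except the initial guess: Python's float 'round(a ** (1.0/3.0))' has no
-- Lean counterpart, so the guess is 0; A's two nudge loops (ported exactly) make the returned
-- value independent of the starting guess, so the port is exact on the return value.
def icbrt_exact_py (m : Int) : Option Int :=
  if m = 0 then some 0
  else
    let sgn : Int := if m < 0 then -1 else 1
    let a := |m|
    let k := pvNudgeUp a 0
    let k := pvNudgeDown a k
    if k * k * k = a then some (sgn * k) else none

-- ===== PORT B =====
-- B's binary-search loop: state (lo, hi, k)
def pvBisect (a lo hi k : Int) : Int :=
  if lo ≤ hi then
    let mid := PySem.Int.floordiv (lo + hi) 2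
    if mid * mid * mid ≤ a then pvBisect a (mid + 1) hi mid
    else pvBisect a lo (mid - 1) k
  else k
termination_by (hi + 1 - lo).toNat
decreasing_by
  · have h := PySem.Int.floordiv_two_mid_bounds (by assumption : lo ≤ hi)
    omega
  · have h := PySem.Int.floordiv_two_mid_bounds (by assumption : lo ≤ hi)
    omega

def icbrt_exact_py_alt (m : Int) : Option Int :=
  if m = 0 then some 0
  else
    let sgn : Int := if m < 0 then -1 else 1
    let a := |m|
    let k := pvBisect a 0 a 0
    if k * k * k = a then some (sgn * k) else none

-- ===== PRECONDITION & SPEC =====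
def Spec_icbrt_exact_py (m : Int) (out : Option Int) : Prop := out = icbrt_exact_py_alt m
instance (m : Int) (out : Option Int) : Decidable (Spec_icbrt_exact_py m out) := by unfold Spec_icbrt_exact_py; infer_instance

-- ===== CLAIM (what is proved, stated in full; the proofs are below) =====
def Claim_equal_icbrt_exact_py : Prop := ∀ (m : Int), Dom_icbrt_exact_py m → Spec_icbrt_exact_py m (icbrt_exact_py m)

-- ===== LEMMAS AND PROOFS =====

theorem pv_cube_mono {x y : Int} (h : x ≤ y) : x * x * x ≤ y * y * y := by
  nlinarith [sq_nonneg (x + y), sq_nonneg (x - y), sq_nonneg x, sq_nonneg y]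

-- k^3 ≤ a < (k+1)^3 determines k uniquely (cube is strictly monotone on ℤ)
theorem pv_cube_unique {a x y : Int}
    (hx : x * x * x ≤ a ∧ a < (x + 1) * (x + 1) * (x + 1))
    (hy : y * y * y ≤ a ∧ a < (y + 1) * (y + 1) * (y + 1)) : x = y := by
  by_contra hne
  rcases lt_or_gt_of_ne hne with h | h
  · have := pv_cube_mono (by omega : x + 1 ≤ y); omega
  · have := pv_cube_mono (by omega : y + 1 ≤ x); omega

theorem pvNudgeUp_spec (a k : Int) :
    a ≤ pvNudgeUp a k * pvNudgeUp a k * pvNudgeUp a k ∧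
    (pvNudgeUp a k = k ∨
      (pvNudgeUp a k - 1) * (pvNudgeUp a k - 1) * (pvNudgeUp a k - 1) < a) := by
  induction k using pvNudgeUp.induct (a := a) with
  | case1 k h ih =>
    rw [pvNudgeUp, if_pos h]
    rcases ih with ⟨h1, h2⟩
    refine ⟨h1, ?_⟩
    rcases h2 with h2 | h2
    · right; rw [h2]; simpa using h
    · right; exact h2
  | case2 k h =>
    rw [pvNudgeUp, if_neg h]
    exact ⟨by omega, Or.inl rfl⟩

theorem pvNudgeDown_spec (a k : Int) :
    pvNudgeDown a k * pvNudgeDown a k * pvNudgeDown a k ≤ a ∧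
    (pvNudgeDown a k = k ∨
      a < (pvNudgeDown a k + 1) * (pvNudgeDown a k + 1) * (pvNudgeDown a k + 1)) := by
  induction k using pvNudgeDown.induct (a := a) with
  | case1 k h ih =>
    rw [pvNudgeDown, if_pos h]
    rcases ih with ⟨h1, h2⟩
    refine ⟨h1, ?_⟩
    rcases h2 with h2 | h2
    · right; rw [h2]; simpa using h
    · right; exact h2
  | case2 k h =>
    rw [pvNudgeDown, if_neg h]
    exact ⟨by omega, Or.inl rfl⟩

-- A's two loops started at any guess produce the unique k with k^3 ≤ a < (k+1)^3.
theorem pvNudge_result (a g : Int) :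
    pvNudgeDown a (pvNudgeUp a g) * pvNudgeDown a (pvNudgeUp a g) * pvNudgeDown a (pvNudgeUp a g) ≤ a ∧
    a < (pvNudgeDown a (pvNudgeUp a g) + 1) * (pvNudgeDown a (pvNudgeUp a g) + 1) *
      (pvNudgeDown a (pvNudgeUp a g) + 1) := by
  have hu := pvNudgeUp_spec a g
  have hd := pvNudgeDown_spec a (pvNudgeUp a g)
  set u := pvNudgeUp a g with hu'
  set d := pvNudgeDown a u with hd'
  refine ⟨hd.1, ?_⟩
  rcases hd.2 with h | h
  · -- no decrement happened: d = u, so u^3 = a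
    rw [h] at hd ⊢
    have hk3 : u * u * u = a := by omega
    have : u * u * u < (u + 1) * (u + 1) * (u + 1) := by nlinarith [sq_nonneg (2 * u + 1)]
    omega
  · exact h

-- binary-search invariant: k^3 ≤ a, a < (hi+1)^3, lo ≤ k+1 ⟹ result r has r^3 ≤ a < (r+1)^3
theorem pvBisect_spec (a lo hi k : Int) :
    k * k * k ≤ a → a < (hi + 1) * (hi + 1) * (hi + 1) → lo ≤ k + 1 →
    pvBisect a lo hi k * pvBisect a lo hi k * pvBisect a lo hi k ≤ a ∧
    a < (pvBisect a lo hi k + 1) * (pvBisect a lo hi k + 1) * (pvBisect a lo hi k + 1) := by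
  induction lo, hi, k using pvBisect.induct (a := a) with
  | case1 lo hi k hle mid hm ih =>
    intro h1 h2 h3
    have hmid : mid = PySem.Int.floordiv (lo + hi) 2 := rfl
    rw [pvBisect, if_pos hle, ← hmid, if_pos hm]
    exact ih hm h2 (by omega)
  | case2 lo hi k hle mid hm ih =>
    intro h1 h2 h3
    have hmid : mid = PySem.Int.floordiv (lo + hi) 2 := rfl
    rw [pvBisect, if_pos hle, ← hmid, if_neg hm]
    refine ih h1 ?_ h3
    have e : mid - 1 + 1 = mid := by omega
    rw [e]; omega
  | case3 lo hi k hle =>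
    intro h1 h2 h3
    rw [pvBisect, if_neg hle]
    have := pv_cube_mono (by omega : hi + 1 ≤ k + 1)
    exact ⟨h1, by omega⟩

theorem pv_loops_eq (a : Int) (ha : 1 ≤ a) :
    pvNudgeDown a (pvNudgeUp a 0) = pvBisect a 0 a 0 := by
  have hA := pvNudge_result a 0
  have hB := pvBisect_spec a 0 a 0 (by omega)
    (by nlinarith [sq_nonneg a, sq_nonneg (a + 1)]) (by omega)
  exact pv_cube_unique hA hB

-- ===== VERDICT (by name: the statement is the Claim_ definition above) =====
theorem icbrt_exact_py_spec : Claim_equal_icbrt_exact_py := by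
  intro m _
  show icbrt_exact_py m = icbrt_exact_py_alt m
  by_cases hm : m = 0
  · simp [icbrt_exact_py, icbrt_exact_py_alt, hm]
  · have ha : 1 ≤ |m| := by
      rcases abs_pos.mpr hm with h
      omega
    simp only [icbrt_exact_py, icbrt_exact_py_alt, if_neg hm, pv_loops_eq _ ha]
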